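-- pv_equiv track=rewrite | github.com/yanorck/Phishing-Detector | modules/basic_checks.py | check_against_known_phishing_lists
-- ===== SOURCE A (Python) =====
-- KNOWN_PHISHING_DOMAINS_CACHE = {
--     "www.phishingsite1.com",
--     "malicious-login.net",
--     "secure-update-totally-real.org"
-- }
--
-- def check_against_known_phishing_lists(url_hostname):
--     """
--     Verifica se o hostname (ou partes dele) está em listas conhecidas de phishing.
--     Esta é uma SIMULAÇÃO. Em um sistema real, você usaria APIs (Google Safe Browse)
--     ou manteria um banco de dados atualizado.
--     """
--     if not url_hostname:
--         return False
--
--     if url_hostname in KNOWN_PHISHING_DOMAINS_CACHE: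
--         return True
--
--     parts = url_hostname.split('.')
--     for i in range(len(parts) -1):
--         sub_domain_to_check = ".".join(parts[i:])
--         if sub_domain_to_check in KNOWN_PHISHING_DOMAINS_CACHE:
--             return True
--
--     return False
-- ===== SOURCE B (Python) =====
-- KNOWN_PHISHING_DOMAINS_CACHE = {
--     "www.phishingsite1.com",
--     "malicious-login.net",
--     "secure-update-totally-real.org"
-- }
--
-- def check_against_known_phishing_lists(url_hostname):
--     # Scan the known-phishing set with a dot-aligned suffix test instead of
--     # generating and looking up every suffix of the hostname.
--     if not url_hostname:
--         return False
--     for domain in KNOWN_PHISHING_DOMAINS_CACHE: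
--         if url_hostname == domain or url_hostname.endswith('.' + domain):
--             return True
--     return False
-- ===== Notes on version B (the rewrite author's own statement) =====
-- stated objective: idiomatic
-- what changed: B iterates over the fixed phishing set testing hostname equality or a dot-aligned endswith suffix, instead of A's splitting the hostname and joining every suffix of its parts for set lookup.
import Mathlib
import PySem

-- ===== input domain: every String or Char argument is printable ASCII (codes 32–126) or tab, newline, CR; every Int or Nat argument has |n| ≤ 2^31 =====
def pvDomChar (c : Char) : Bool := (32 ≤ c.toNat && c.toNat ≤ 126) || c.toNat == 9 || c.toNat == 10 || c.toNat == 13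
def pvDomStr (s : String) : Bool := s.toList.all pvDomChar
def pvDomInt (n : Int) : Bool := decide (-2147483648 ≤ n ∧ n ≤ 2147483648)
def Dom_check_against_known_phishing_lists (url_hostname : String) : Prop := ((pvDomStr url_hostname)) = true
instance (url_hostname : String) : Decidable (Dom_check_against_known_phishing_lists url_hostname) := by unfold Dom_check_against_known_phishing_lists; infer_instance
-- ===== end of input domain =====

-- B scans the fixed phishing set with a dot-aligned endswith test instead of A's split/join over every hostname suffix (objective: idiomatic; same result).

-- ===== PORT A =====
def KNOWN_PHISHING_DOMAINS_CACHE : PySem.Set String :=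
  PySem.Set.ofList ["www.phishingsite1.com", "malicious-login.net", "secure-update-totally-real.org"]

-- the `for i in range(len(parts)-1)` loop with its early return
def phishLoopA (parts : List String) : List Int → Bool
  | [] => false
  | i :: rest =>
      if PySem.Set.contains KNOWN_PHISHING_DOMAINS_CACHE
          (PySem.Str.join "." (PySem.List.slice parts (some i) none)) then true
      else phishLoopA parts rest

def check_against_known_phishing_lists (url_hostname : String) : Bool :=
  if PySem.Str.len url_hostname == 0 then false      -- `if not url_hostname`
  else if PySem.Set.contains KNOWN_PHISHING_DOMAINS_CACHE url_hostname then true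
  else
    -- sep "." is nonempty, so split? is always `some`; getD's default is never used
    let parts := (PySem.Str.split? url_hostname ".").getD []
    phishLoopA parts (PySem.List.pyRange 0 ((parts.length : Int) - 1) 1)

-- ===== PORT B =====
-- the `for domain in KNOWN_PHISHING_DOMAINS_CACHE` loop with its early return
def phishLoopB (s : String) : List String → Bool
  | [] => false
  | d :: rest =>
      if s == d || PySem.Str.endswith s (String.ofList ('.' :: d.toList)) then true
      else phishLoopB s rest

def check_against_known_phishing_lists_alt (url_hostname : String) : Bool :=
  if PySem.Str.len url_hostname == 0 then false      -- `if not url_hostname`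
  else phishLoopB url_hostname KNOWN_PHISHING_DOMAINS_CACHE

-- ===== PRECONDITION & SPEC =====
def Spec_check_against_known_phishing_lists (url_hostname : String) (out : Bool) : Prop := out = check_against_known_phishing_lists_alt url_hostname
instance (url_hostname : String) (out : Bool) : Decidable (Spec_check_against_known_phishing_lists url_hostname out) := by unfold Spec_check_against_known_phishing_lists; infer_instance

-- ===== CLAIM (what is proved, stated in full; the proofs are below) =====
def Claim_equal_check_against_known_phishing_lists : Prop := ∀ (url_hostname : String), Dom_check_against_known_phishing_lists url_hostname → Spec_check_against_known_phishing_lists url_hostname (check_against_known_phishing_lists url_hostname)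

-- ===== LEMMAS AND PROOFS =====

-- PySem's fueled splitOn with a one-character separator is Mathlib's splitOnP
theorem pysem_splitOn_go_eq (c : Char) (fuel : Nat) (l cur : List Char) (acc : List (List Char))
    (h : l.length < fuel) :
    PySem.Chars.splitOn.go [c] fuel l cur acc =
      acc.reverse ++ List.modifyHead (cur.reverse ++ ·) (List.splitOnP (· == c) l) := by
  induction fuel generalizing l cur acc with
  | zero => omega
  | succ fuel ih =>
    cases l with
    | nil =>
      simp [PySem.Chars.splitOn.go, List.splitOnP_nil]
    | cons a rest =>
      rw [PySem.Chars.splitOn.go]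
      by_cases hca : a = c
      · subst hca
        have hpre : List.isPrefixOf [a] (a :: rest) = true := by
          simp [List.isPrefixOf]
        rw [if_pos hpre]
        rw [ih _ _ _ (by simpa using Nat.lt_of_succ_lt_succ h)]
        rw [List.splitOnP_cons]
        simp only [beq_self_eq_true, if_pos]
        rcases hsp : List.splitOnP (· == a) rest with _ | ⟨p, t⟩
        · exact absurd hsp (List.splitOnP_ne_nil _ _)
        · simp [hsp]
      · have hpre : List.isPrefixOf [c] (a :: rest) = false := by
          simp [List.isPrefixOf]
          exact fun hh => absurd hh.symm hca
        rw [if_neg (by simp [hpre])]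
        rw [ih _ _ _ (by simpa using Nat.lt_of_succ_lt_succ h)]
        rw [List.splitOnP_cons]
        have : ((a == c) = true) = False := by simp; exact fun hh => absurd hh hca
        rw [if_neg (by simp [hca])]
        rcases hsp : List.splitOnP (· == c) rest with _ | ⟨p, t⟩
        · exact absurd hsp (List.splitOnP_ne_nil _ _)
        · simp

theorem pysem_splitOn_eq (c : Char) (l : List Char) :
    PySem.Chars.splitOn l [c] = List.splitOnP (· == c) l := by
  rw [PySem.Chars.splitOn]
  rw [pysem_splitOn_go_eq c (l.length + 1) l [] [] (Nat.lt_succ_self _)]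
  rcases hsp : List.splitOnP (· == c) l with _ | ⟨p, t⟩
  · exact absurd hsp (List.splitOnP_ne_nil _ _)
  · simp

-- dropping 0 < i < length parts and re-joining yields a dot-preceded suffix
theorem intercalate_drop_suffix (P : List (List Char)) (i : Nat) (h0 : 0 < i)
    (h1 : i < P.length) :
    ∃ t, List.intercalate ['.'] P = t ++ '.' :: List.intercalate ['.'] (P.drop i) := by
  induction i generalizing P with
  | zero => omega
  | succ i ih =>
    rcases P with _ | ⟨p, P'⟩
    · simp at h1
    rcases P' with _ | ⟨q, rest⟩
    · simp at h1
    have hcons : List.intercalate ['.'] (p :: q :: rest) =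
        p ++ '.' :: List.intercalate ['.'] (q :: rest) := by
      have := PySem.Chars.join_cons_cons ['.'] p q rest
      simpa [PySem.Chars.join] using this
    rcases Nat.eq_zero_or_pos i with hi0 | hipos
    · subst hi0
      exact ⟨p, by simpa using hcons⟩
    · obtain ⟨t, ht⟩ := ih (q :: rest) hipos (by simpa using Nat.lt_of_succ_lt_succ h1)
      refine ⟨p ++ '.' :: t, ?_⟩
      rw [List.drop_succ_cons, hcons, ht]
      simp

-- a string containing '.' splits into at least two parts
theorem splitOnP_length_two (d : List Char) (h : '.' ∈ d) :
    2 ≤ (List.splitOnP (· == '.') d).length := by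
  obtain ⟨u, v, huv⟩ := List.append_of_mem h
  subst huv
  rw [List.splitOnP_append_cons _ _ _ _ (by simp)]
  have h1 := List.splitOnP_ne_nil (· == '.') u
  have h2 := List.splitOnP_ne_nil (· == '.') v
  rw [List.length_append]
  have := List.length_pos_iff.mpr h1
  have := List.length_pos_iff.mpr h2
  omega

-- the main characterisation, per phishing domain, at the Chars level
theorem suffix_char (L d : List Char) (hd : '.' ∈ d) :
    ((∃ i : Nat, i + 1 < (List.splitOnP (· == '.') L).length ∧
        List.intercalate ['.'] ((List.splitOnP (· == '.') L).drop i) = d) ∨ L = d)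
      ↔ (L = d ∨ ('.' :: d) <:+ L) := by
  have hL : List.intercalate ['.'] (List.splitOnP (· == '.') L) = L := by
    have := List.intercalate_splitOn L '.'
    simpa [List.splitOn] using this
  constructor
  · rintro (⟨i, hi, hjoin⟩ | hLd)
    · rcases Nat.eq_zero_or_pos i with hi0 | hipos
      · subst hi0
        simp only [List.drop_zero] at hjoin
        exact Or.inl (hL ▸ hjoin ▸ rfl)
      · obtain ⟨t, ht⟩ := intercalate_drop_suffix (List.splitOnP (· == '.') L) i hipos (by omega)
        rw [hjoin] at ht
        exact Or.inr ⟨t, by rw [← hL, ht]⟩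
    · exact Or.inl hLd
  · rintro (hLd | ⟨t, ht⟩)
    · refine Or.inl ⟨0, ?_, by simpa [List.drop_zero] using hL.trans hLd⟩
      subst hLd
      have := splitOnP_length_two L hd
      omega
    · have hsplit : List.splitOnP (· == '.') L =
          List.splitOnP (· == '.') t ++ List.splitOnP (· == '.') d := by
        rw [← ht, List.splitOnP_append_cons _ _ _ _ (by simp)]
      refine Or.inl ⟨(List.splitOnP (· == '.') t).length, ?_, ?_⟩
      · have := splitOnP_length_two d hd
        rw [hsplit, List.length_append]
        omega
      · rw [hsplit, List.drop_left]
        have := List.intercalate_splitOn d '.'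
        simpa [List.splitOn] using this

theorem loopA_any (parts : List String) (is : List Int) :
    phishLoopA parts is = is.any (fun i =>
      PySem.Set.contains KNOWN_PHISHING_DOMAINS_CACHE
        (PySem.Str.join "." (PySem.List.slice parts (some i) none))) := by
  induction is with
  | nil => rfl
  | cons i rest ih =>
      simp only [phishLoopA, List.any_cons, ih]
      cases PySem.Set.contains KNOWN_PHISHING_DOMAINS_CACHE
        (PySem.Str.join "." (PySem.List.slice parts (some i) none)) <;> simp

theorem loopB_any (s : String) (ds : List String) :
    phishLoopB s ds = ds.any (fun d =>
      s == d || PySem.Str.endswith s (String.ofList ('.' :: d.toList))) := by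
  induction ds with
  | nil => rfl
  | cons d rest ih =>
    simp only [phishLoopB, List.any_cons, ih]
    cases hb : (s == d || PySem.Str.endswith s (String.ofList ('.' :: d.toList))) <;> simp [hb]

theorem parts_eq (s : String) :
    (PySem.Str.split? s ".").getD [] =
      (List.splitOnP (· == '.') s.toList).map String.ofList := by
  rw [PySem.Str.split?.eq_1]
  have h1 : ".".toList = ['.'] := rfl
  have h2 : PySem.Chars.split? s.toList ['.'] =
      some (List.splitOnP (· == '.') s.toList) := by
    rw [PySem.Chars.split?.eq_1]
    simp [pysem_splitOn_eq]
  rw [h1, h2]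
  rfl

theorem joinA_eq (Q : List (List Char)) (k : Nat) :
    PySem.Str.join "." (List.drop k (Q.map String.ofList)) =
      String.ofList (List.intercalate ['.'] (Q.drop k)) := by
  rw [PySem.Str.join.eq_1]
  have : List.map String.toList (List.drop k (Q.map String.ofList)) = Q.drop k := by
    rw [← List.map_drop, List.map_map]
    simp [Function.comp_def]
  rw [this]
  rfl

theorem cache_list : KNOWN_PHISHING_DOMAINS_CACHE =
    (["www.phishingsite1.com", "malicious-login.net",
      "secure-update-totally-real.org"] : List String) := rfl

theorem mem_cache_iff (t : String) :
    PySem.Set.contains KNOWN_PHISHING_DOMAINS_CACHE t = true ↔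
      (t = "www.phishingsite1.com" ∨ t = "malicious-login.net" ∨
        t = "secure-update-totally-real.org") := by
  rw [PySem.Set.contains_iff]
  show t ∈ (["www.phishingsite1.com", "malicious-login.net",
    "secure-update-totally-real.org"] : List String)  ↔ _
  simp

-- the per-domain equivalence at the String level
theorem per_domain (s d : String) (hd : '.' ∈ d.toList) :
    ((∃ i ∈ PySem.List.pyRange 0
        ((((PySem.Str.split? s ".").getD []).length : Int) - 1) 1,
        PySem.Str.join "." (PySem.List.slice ((PySem.Str.split? s ".").getD [])
          (some i) none) = d) ∨ s = d)
      ↔ (s = d ∨ PySem.Str.endswith s (String.ofList ('.' :: d.toList)) = true) := by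
  have hQ := parts_eq s
  have hse : (PySem.Str.endswith s (String.ofList ('.' :: d.toList)) = true)
      ↔ ('.' :: d.toList) <:+ s.toList := by
    rw [PySem.Str.endswith_eq]
    rw [PySem.Chars.endswith_iff]
    rw [String.toList_ofList]
  have hsd : (s = d) ↔ (s.toList = d.toList) := String.toList_inj.symm
  rw [hQ, hse, hsd]
  have key := suffix_char s.toList d.toList hd
  constructor
  · rintro (⟨i, hi, hjoin⟩ | hLd)
    · rw [PySem.List.mem_pyRange_one] at hi
      obtain ⟨hi0, hib⟩ := hi
      rw [PySem.List.slice_from _ hi0, joinA_eq] at hjoin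
      have hj : List.intercalate ['.'] ((List.splitOnP (· == '.') s.toList).drop i.toNat)
          = d.toList := by
        rw [← String.toList_ofList (l := List.intercalate ['.']
          ((List.splitOnP (· == '.') s.toList).drop i.toNat)), hjoin]
      have hlen : i.toNat + 1 < (List.splitOnP (· == '.') s.toList).length := by
        rw [List.length_map] at hib
        omega
      exact key.mp (Or.inl ⟨i.toNat, hlen, hj⟩)
    · exact key.mp (Or.inr hLd)
  · intro h
    rcases key.mpr h with (⟨j, hj, hjoin⟩ | hLd)
    · refine Or.inl ⟨(j : Int), ?_, ?_⟩
      · rw [PySem.List.mem_pyRange_one]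
        rw [List.length_map]
        constructor
        · exact Int.ofNat_nonneg j
        · omega
      · rw [PySem.List.slice_from _ (Int.ofNat_nonneg j), joinA_eq]
        simp only [Int.toNat_natCast]
        rw [hjoin, String.ofList_toList]
    · exact Or.inr hLd

-- ===== VERDICT (by name: the statement is the Claim_ definition above) =====
theorem check_against_known_phishing_lists_spec : Claim_equal_check_against_known_phishing_lists := by
  intro s _
  show check_against_known_phishing_lists s = check_against_known_phishing_lists_alt s
  unfold check_against_known_phishing_lists check_against_known_phishing_lists_alt
  by_cases h0 : (PySem.Str.len s == 0) = true
  · rw [if_pos h0, if_pos h0]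
  rw [if_neg h0, if_neg h0]
  cases hc : PySem.Set.contains KNOWN_PHISHING_DOMAINS_CACHE s with
  | true =>
    rw [if_pos rfl, loopB_any]
    symm
    rw [List.any_eq_true]
    rcases (mem_cache_iff s).mp hc with h | h | h
    all_goals exact ⟨s, by rw [h, cache_list]; simp, by simp⟩
  | false =>
    rw [if_neg (by simp), loopA_any, loopB_any, Bool.eq_iff_iff,
      List.any_eq_true, List.any_eq_true]
    have hnot : ¬(s = "www.phishingsite1.com" ∨ s = "malicious-login.net" ∨
        s = "secure-update-totally-real.org") := by
      rw [← mem_cache_iff, hc]; simp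
    push_neg at hnot
    obtain ⟨hn1, hn2, hn3⟩ := hnot
    have e1 := per_domain s "www.phishingsite1.com" (by decide)
    have e2 := per_domain s "malicious-login.net" (by decide)
    have e3 := per_domain s "secure-update-totally-real.org" (by decide)
    constructor
    · rintro ⟨i, hi, hcont⟩
      rcases (mem_cache_iff _).mp hcont with h | h | h
      · rcases e1.mp (Or.inl ⟨i, hi, h⟩) with h' | h'
        · exact absurd h' hn1
        · exact ⟨"www.phishingsite1.com", by rw [cache_list]; simp, Bool.or_eq_true_iff.mpr (Or.inr h')⟩
      · rcases e2.mp (Or.inl ⟨i, hi, h⟩) with h' | h'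
        · exact absurd h' hn2
        · exact ⟨"malicious-login.net", by rw [cache_list]; simp, Bool.or_eq_true_iff.mpr (Or.inr h')⟩
      · rcases e3.mp (Or.inl ⟨i, hi, h⟩) with h' | h'
        · exact absurd h' hn3
        · exact ⟨"secure-update-totally-real.org", by rw [cache_list]; simp, Bool.or_eq_true_iff.mpr (Or.inr h')⟩
    · rintro ⟨d, hd, hcond⟩
      rcases Bool.or_eq_true_iff.mp hcond with heq | hend
      · exact absurd (beq_iff_eq.mp heq) (by
          rcases (mem_cache_iff d).mp ((PySem.Set.contains_iff _ _).mpr hd)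
            with h | h | h <;> subst h
          · exact hn1
          · exact hn2
          · exact hn3)
      · rcases (mem_cache_iff d).mp ((PySem.Set.contains_iff _ _).mpr hd)
          with h | h | h <;> subst h
        · rcases e1.mpr (Or.inr hend) with (⟨i, hi, hj⟩ | h') 
          · exact ⟨i, hi, (mem_cache_iff _).mpr (Or.inl hj)⟩
          · exact absurd h' hn1
        · rcases e2.mpr (Or.inr hend) with (⟨i, hi, hj⟩ | h')
          · exact ⟨i, hi, (mem_cache_iff _).mpr (Or.inr (Or.inl hj))⟩
          · exact absurd h' hn2
        · rcases e3.mpr (Or.inr hend) with (⟨i, hi, hj⟩ | h')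
          · exact ⟨i, hi, (mem_cache_iff _).mpr (Or.inr (Or.inr hj))⟩
          · exact absurd h' hn3
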